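-- pv_equiv track=rewrite | github.com/machinereading/BERT_for_Korean_SRL | preprocessor.py | data2tgt_data
-- ===== SOURCE A (Python) =====
-- def data2tgt_data(input_data):
--     result = []
--     for item in input_data:
--         ori_tokens, ori_preds = item[0],item[1]
--         for idx in range(len(ori_preds)):
--             pred = ori_preds[idx]
--             if pred != '_':
--                 if idx == 0:
--                     begin = idx
--                 elif ori_preds[idx-1] == '_':
--                     begin = idx
--                 end = idx
--         tokens, preds = [],[]
--         for idx in range(len(ori_preds)):
--             token = ori_tokens[idx]
--             pred = ori_preds[idx]
--             if idx == begin: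
--                 tokens.append('<tgt>')
--                 preds.append('_')
--
--             tokens.append(token)
--             preds.append(pred)
--
--             if idx == end:
--                 tokens.append('</tgt>')
--                 preds.append('_')
--         sent = []
--         sent.append(tokens)
--         sent.append(preds)
--         result.append(sent)
--     return result
-- ===== SOURCE B (Python) =====
-- def data2tgt_data(input_data):
--     result = []
--     for item in input_data:
--         toks, preds = item[0], item[1]
--         n = len(preds)
--         end = None
--         for i in range(n - 1, -1, -1):
--             if preds[i] != '_':
--                 end = i
--                 break
--         begin = end
--         while begin > 0 and preds[begin - 1] != '_':
--             begin -= 1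
--         tokens = toks[:begin] + ['<tgt>'] + toks[begin:end + 1] + ['</tgt>'] + toks[end + 1:n]
--         npreds = preds[:begin] + ['_'] + preds[begin:end + 1] + ['_'] + preds[end + 1:n]
--         result.append([tokens, npreds])
--     return result
-- ===== Notes on version B (the rewrite author's own statement) =====
-- stated objective: simpler
-- what changed: Replaces A's forward state-machine pass plus per-index conditional-append loop by a right-to-left scan for the last predicate index, a left walk to the run start, and slice concatenation to insert the <tgt>/</tgt> markers.
-- outside the precondition, e.g. on data2tgt_data([[['a'], []]]): A returns [[[], []]], B raises TypeError
import Mathlib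
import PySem

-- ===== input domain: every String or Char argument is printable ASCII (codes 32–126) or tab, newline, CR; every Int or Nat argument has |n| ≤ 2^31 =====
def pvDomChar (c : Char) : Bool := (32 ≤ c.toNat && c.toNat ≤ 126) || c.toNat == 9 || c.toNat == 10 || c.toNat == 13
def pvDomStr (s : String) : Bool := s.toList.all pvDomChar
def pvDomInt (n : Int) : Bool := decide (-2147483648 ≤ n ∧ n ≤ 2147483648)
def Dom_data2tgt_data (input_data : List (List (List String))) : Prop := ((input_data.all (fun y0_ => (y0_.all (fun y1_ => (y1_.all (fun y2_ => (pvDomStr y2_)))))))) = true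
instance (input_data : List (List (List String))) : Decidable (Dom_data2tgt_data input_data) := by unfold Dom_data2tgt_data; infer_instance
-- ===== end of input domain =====

-- B replaces A's forward state-machine pass and conditional-append loop by a right-to-left
-- scan for the last predicate index, a walk back to its run start, and slice concatenation.

-- ===== PORT A =====
-- first inner loop of A: threads (begin, end) state; `none` models Python's unbound variable
-- (unreachable under Pre_). List indexing via getD is exact for the in-range indices Pre_ admits.
def pvAStep1 (ori_preds : List String) (be : Option Nat × Option Nat) (idx : Nat) :
    Option Nat × Option Nat :=
  let pred := ori_preds.getD idx ""
  if pred ≠ "_" then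
    let b := if idx = 0 then some idx
             else if ori_preds.getD (idx - 1) "" = "_" then some idx
             else be.1
    (b, some idx)
  else be

-- second inner loop of A: builds (tokens, preds) by conditional appends
def pvAStep2 (ori_tokens ori_preds : List String) (b e : Option Nat)
    (tp : List String × List String) (idx : Nat) : List String × List String :=
  let token := ori_tokens.getD idx ""
  let pred := ori_preds.getD idx ""
  let tp := if some idx = b then (tp.1 ++ ["<tgt>"], tp.2 ++ ["_"]) else tp
  let tp := (tp.1 ++ [token], tp.2 ++ [pred])
  if some idx = e then (tp.1 ++ ["</tgt>"], tp.2 ++ ["_"]) else tp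

def data2tgt_data (input_data : List (List (List String))) : List (List (List String)) :=
  (input_data.foldl
    (fun (st : List (List (List String)) × Option Nat × Option Nat) item =>
      let ori_tokens := item.getD 0 []
      let ori_preds := item.getD 1 []
      let be := (List.range ori_preds.length).foldl (pvAStep1 ori_preds) st.2
      let tp := (List.range ori_preds.length).foldl
                  (pvAStep2 ori_tokens ori_preds be.1 be.2) ([], [])
      (st.1 ++ [[tp.1, tp.2]], be))
    ([], (none, none))).1

-- ===== PORT B =====
-- backward scan `for i in range(n-1,-1,-1): if preds[i] != '_': end = i; break`
def pvFindEnd (preds : List String) : Nat → Option Nat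
  | 0 => none
  | n + 1 => if preds.getD n "" ≠ "_" then some n else pvFindEnd preds n

-- `while begin > 0 and preds[begin-1] != '_': begin -= 1`
def pvFindBegin (preds : List String) : Nat → Nat
  | 0 => 0
  | b + 1 => if preds.getD b "" ≠ "_" then pvFindBegin preds b else b + 1

-- one item of B; slices with the nonnegative bounds b, e+1, n are take/drop (exact).
-- On a predicate-less item Python B raises (outside Pre_); the port returns [] there.
def pvBItem (item : List (List String)) : List (List String) :=
  let toks := item.getD 0 []
  let preds := item.getD 1 []
  let n := preds.length
  match pvFindEnd preds n with
  | none => []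
  | some e =>
    let b := pvFindBegin preds e
    [toks.take b ++ ["<tgt>"] ++ ((toks.take (e + 1)).drop b) ++ ["</tgt>"]
       ++ ((toks.take n).drop (e + 1)),
     preds.take b ++ ["_"] ++ ((preds.take (e + 1)).drop b) ++ ["_"]
       ++ ((preds.take n).drop (e + 1))]

def data2tgt_data_alt (input_data : List (List (List String))) : List (List (List String)) :=
  input_data.map pvBItem

-- ===== PRECONDITION & SPEC =====
-- Pre_ excludes items on which A raises (fewer than two fields: IndexError; a token list
-- shorter than the pred list: IndexError; a predicate-less FIRST item: UnboundLocalError),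
-- and predicate-less later items, where A's returned value is an artefact of begin/end
-- leaking from the previous item — B itself raises (TypeError) on every predicate-less item.
def Pre_data2tgt_data (input_data : List (List (List String))) : Prop :=
  ∀ item ∈ input_data, 2 ≤ item.length ∧
    (item.getD 1 []).length ≤ (item.getD 0 []).length ∧
    ∃ p ∈ item.getD 1 [], p ≠ "_"

instance (input_data : List (List (List String))) : Decidable (Pre_data2tgt_data input_data) := by
  unfold Pre_data2tgt_data; infer_instance

def pvWitness_data2tgt_data : List (List (List String)) := [[["a", "b"], ["_", "v"]]]

def Spec_data2tgt_data (input_data : List (List (List String))) (out : List (List (List String))) : Prop := out = data2tgt_data_alt input_data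
instance (input_data : List (List (List String))) (out : List (List (List String))) : Decidable (Spec_data2tgt_data input_data out) := by unfold Spec_data2tgt_data; infer_instance

-- ===== CLAIM (what is proved, stated in full; the proofs are below) =====
def Claim_equal_data2tgt_data : Prop := ∀ (input_data : List (List (List String))), Dom_data2tgt_data input_data → Pre_data2tgt_data input_data → Spec_data2tgt_data input_data (data2tgt_data input_data)

-- ===== LEMMAS AND PROOFS =====

theorem pvFindBegin_le (preds : List String) (e : Nat) : pvFindBegin preds e ≤ e := by
  induction e with
  | zero => simp [pvFindBegin]
  | succ b ih => unfold pvFindBegin; split <;> omega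

theorem pvFindEnd_lt (preds : List String) (n e : Nat)
    (h : pvFindEnd preds n = some e) : e < n ∧ preds.getD e "" ≠ "_" := by
  induction n with
  | zero => simp [pvFindEnd] at h
  | succ m ih =>
    unfold pvFindEnd at h
    split at h
    · cases h; exact ⟨by omega, by assumption⟩
    · have := ih h; exact ⟨by omega, this.2⟩

theorem pvFindEnd_some (preds : List String) (n : Nat)
    (h : ∃ j, j < n ∧ preds.getD j "" ≠ "_") : ∃ e, pvFindEnd preds n = some e := by
  induction n with
  | zero => obtain ⟨j, hj, _⟩ := h; omega
  | succ m ih =>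
    unfold pvFindEnd
    split
    · exact ⟨m, rfl⟩
    · rename_i hm
      apply ih
      obtain ⟨j, hj, hne⟩ := h
      refine ⟨j, ?_, hne⟩
      rcases Nat.lt_succ_iff_lt_or_eq.mp hj with h' | h'
      · exact h'
      · subst h'; exact absurd hne (by simpa using hm)

-- A's first loop computes (findBegin e, e) for e = the result of B's backward scan,
-- independently of the incoming state, as soon as some predicate below n is non-'_'.
theorem pvLoop1_char (preds : List String) (n : Nat) (st : Option Nat × Option Nat) :
    (List.range n).foldl (pvAStep1 preds) st =
      match pvFindEnd preds n with
      | none => st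
      | some e => (some (pvFindBegin preds e), some e) := by
  induction n generalizing st with
  | zero => simp [pvFindEnd]
  | succ m ih =>
    rw [List.range_succ, List.foldl_append, ih st]
    by_cases hm : preds[m]?.getD "" = "_"
    · -- step at m does nothing
      have hstep : pvFindEnd preds (m + 1) = pvFindEnd preds m := by
        simp [pvFindEnd, hm]
      rw [hstep]
      cases hfe : pvFindEnd preds m <;> simp [pvAStep1, hm]
    · have hstep : pvFindEnd preds (m + 1) = some m := by
        simp [pvFindEnd, hm]
      rw [hstep]
      rcases Nat.eq_zero_or_pos m with h0 | hpos
      · subst h0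
        simp [pvAStep1, hm, pvFindBegin]
      · obtain ⟨b, rfl⟩ : ∃ b, m = b + 1 := ⟨m - 1, by omega⟩
        by_cases hprev : preds[b]?.getD "" = "_"
        · -- run starts at m = b+1
          have hfb : pvFindBegin preds (b + 1) = b + 1 := by
            simp [pvFindBegin, hprev]
          cases hfe : pvFindEnd preds (b + 1) <;>
            simp [pvAStep1, hm, hprev, hfb]
        · -- continue previous run: previous scan ends at b
          have hfe : pvFindEnd preds (b + 1) = some b := by
            simp [pvFindEnd, hprev]
          rw [hfe]
          have hfb : pvFindBegin preds (b + 1) = pvFindBegin preds b := by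
            simp [pvFindBegin, hprev]
          simp [pvAStep1, hm, hprev, hfb]

-- closed form for the state of A's second loop after m steps (one component)
def pvF (l : List String) (b e m : Nat) (op cl : String) : List String :=
  l.take (min m b) ++ (if b < m then [op] else []) ++ ((l.take (min m (e + 1))).drop b)
    ++ (if e < m then [cl] else []) ++ ((l.take m).drop (e + 1))

theorem pv_take_succ (l : List String) (m : Nat) (hm : m < l.length) :
    l.take (m + 1) = l.take m ++ [l.getD m ""] := by
  rw [List.take_add_one]
  simp [List.getD_eq_getElem?_getD, List.getElem?_eq_getElem hm]

theorem pv_drop_take_succ (l : List String) (b m : Nat) (hb : b ≤ m) (hm : m < l.length) :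
    (l.take (m + 1)).drop b = (l.take m).drop b ++ [l.getD m ""] := by
  rw [pv_take_succ l m hm, List.drop_append_of_le_length (by simp; omega)]

theorem pv_drop_take_nil (l : List String) (b k : Nat) (h : k ≤ b) :
    (l.take k).drop b = [] := by
  apply List.drop_eq_nil_of_le; simp; omega

theorem pvF_succ (l : List String) (b e m : Nat) (op cl : String)
    (hbe : b ≤ e) (hm : m < l.length) :
    pvF l b e (m + 1) op cl =
      (if m = e then
        (if m = b then pvF l b e m op cl ++ [op] else pvF l b e m op cl) ++ [l.getD m ""] ++ [cl]
      else
        (if m = b then pvF l b e m op cl ++ [op] else pvF l b e m op cl) ++ [l.getD m ""]) := by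
  by_cases hme : m = e
  · subst hme
    rw [if_pos rfl]
    by_cases hmb : m = b
    · subst hmb
      rw [if_pos rfl]
      simp only [pvF, Nat.min_eq_right (by omega : m ≤ m + 1), Nat.min_self,
        Nat.min_eq_left (by omega : m + 1 ≤ m + 1), Nat.min_eq_left (by omega : m ≤ m + 1),
        if_pos (by omega : m < m + 1), if_neg (by omega : ¬ m < m),
        pv_drop_take_nil l m m (by omega), pv_drop_take_nil l (m + 1) m (by omega),
        pv_drop_take_nil l (m + 1) (m + 1) (by omega),
        pv_drop_take_succ l m m (by omega) hm]
      simp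
    · have hb : b < m := by omega
      rw [if_neg hmb]
      simp only [pvF, Nat.min_eq_right (by omega : b ≤ m + 1), Nat.min_eq_right (by omega : b ≤ m),
        Nat.min_eq_right (by omega : m + 1 ≤ m + 1), Nat.min_eq_left (by omega : m ≤ m + 1),
        if_pos (by omega : b < m + 1), if_pos (by omega : b < m),
        if_pos (by omega : m < m + 1), if_neg (by omega : ¬ m < m),
        pv_drop_take_nil l (m + 1) (m + 1) (by omega), pv_drop_take_nil l (m + 1) m (by omega),
        pv_drop_take_succ l b m (by omega) hm]
      simp
  · rw [if_neg hme]
    by_cases hmb : m = b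
    · subst hmb
      have hme' : m < e := by omega
      rw [if_pos rfl]
      simp only [pvF, Nat.min_eq_right (by omega : m ≤ m + 1), Nat.min_self,
        Nat.min_eq_left (by omega : m + 1 ≤ e + 1), Nat.min_eq_left (by omega : m ≤ e + 1),
        if_pos (by omega : m < m + 1), if_neg (by omega : ¬ m < m),
        if_neg (by omega : ¬ e < m + 1), if_neg (by omega : ¬ e < m),
        pv_drop_take_nil l m m (by omega), pv_drop_take_nil l (e + 1) m (by omega),
        pv_drop_take_nil l (e + 1) (m + 1) (by omega),
        pv_drop_take_succ l m m (by omega) hm]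
      simp
    · rw [if_neg hmb]
      rcases Nat.lt_trichotomy m b with hc | hc | hc
      · -- m < b ≤ e
        simp only [pvF, Nat.min_eq_left (by omega : m + 1 ≤ b), Nat.min_eq_left (by omega : m ≤ b),
          Nat.min_eq_left (by omega : m + 1 ≤ e + 1), Nat.min_eq_left (by omega : m ≤ e + 1),
          if_neg (by omega : ¬ b < m + 1), if_neg (by omega : ¬ b < m),
          if_neg (by omega : ¬ e < m + 1), if_neg (by omega : ¬ e < m),
          pv_drop_take_nil l b (m + 1) (by omega), pv_drop_take_nil l b m (by omega),
          pv_drop_take_nil l (e + 1) (m + 1) (by omega), pv_drop_take_nil l (e + 1) m (by omega),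
          pv_take_succ l m hm]
        simp
        omega
      · exact absurd hc hmb
      · rcases Nat.lt_or_ge m e with he | he
        · -- b < m < e
          simp only [pvF, Nat.min_eq_right (by omega : b ≤ m + 1), Nat.min_eq_right (by omega : b ≤ m),
            Nat.min_eq_left (by omega : m + 1 ≤ e + 1), Nat.min_eq_left (by omega : m ≤ e + 1),
            if_pos (by omega : b < m + 1), if_pos (by omega : b < m),
            if_neg (by omega : ¬ e < m + 1), if_neg (by omega : ¬ e < m),
            pv_drop_take_nil l (e + 1) (m + 1) (by omega), pv_drop_take_nil l (e + 1) m (by omega),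
            pv_drop_take_succ l b m (by omega) hm]
          simp
        · -- e < m
          have he' : e < m := by omega
          simp only [pvF, Nat.min_eq_right (by omega : b ≤ m + 1), Nat.min_eq_right (by omega : b ≤ m),
            Nat.min_eq_right (by omega : e + 1 ≤ m + 1), Nat.min_eq_right (by omega : e + 1 ≤ m),
            if_pos (by omega : b < m + 1), if_pos (by omega : b < m),
            if_pos (by omega : e < m + 1), if_pos (by omega : e < m),
            pv_drop_take_succ l (e + 1) m (by omega) hm]
          simp

-- A's second loop after m steps, both components at once
theorem pvLoop2_aux (toks preds : List String) (b e n : Nat)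
    (hbe : b ≤ e) (hen : e < n) (hn : n ≤ toks.length) (hnp : n = preds.length) :
    ∀ m, m ≤ n →
    (List.range m).foldl (pvAStep2 toks preds (some b) (some e)) ([], []) =
      (pvF toks b e m "<tgt>" "</tgt>", pvF preds b e m "_" "_") := by
  intro m
  induction m with
  | zero =>
    intro _
    simp [pvF]
  | succ k ih =>
    intro hk
    have hkt : k < toks.length := by omega
    have hkp : k < preds.length := by omega
    rw [List.range_succ, List.foldl_append, ih (by omega)]
    simp only [List.foldl_cons, List.foldl_nil]
    rw [pvF_succ toks b e k "<tgt>" "</tgt>" hbe hkt, pvF_succ preds b e k "_" "_" hbe hkp]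
    unfold pvAStep2
    by_cases hb : k = b <;> by_cases he : k = e
    · subst hb; subst he; simp
    · subst hb; simp [he]
    · subst he; simp [hb]
    · simp [hb, he]

-- A's second loop equals the slice concatenation, for b ≤ e < n ≤ toks.length.
theorem pvLoop2_char (toks preds : List String) (b e n : Nat)
    (hbe : b ≤ e) (hen : e < n) (hn : n ≤ toks.length) (hnp : n = preds.length) :
    (List.range n).foldl (pvAStep2 toks preds (some b) (some e)) ([], []) =
      (toks.take b ++ ["<tgt>"] ++ ((toks.take (e + 1)).drop b) ++ ["</tgt>"]
         ++ ((toks.take n).drop (e + 1)),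
       preds.take b ++ ["_"] ++ ((preds.take (e + 1)).drop b) ++ ["_"]
         ++ ((preds.take n).drop (e + 1))) := by
  rw [pvLoop2_aux toks preds b e n hbe hen hn hnp n (le_refl n)]
  simp only [pvF, Nat.min_eq_right (by omega : b ≤ n), Nat.min_eq_right (by omega : e + 1 ≤ n),
    if_pos (by omega : b < n), if_pos (by omega : e < n)]

-- per-item equality under the item's precondition, for any incoming state
theorem pvItem_eq (item : List (List String)) (st : Option Nat × Option Nat)
    (hlen : (item.getD 1 []).length ≤ (item.getD 0 []).length)
    (hex : ∃ p ∈ item.getD 1 [], p ≠ "_") :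
    (let ori_tokens := item.getD 0 []
     let ori_preds := item.getD 1 []
     let be := (List.range ori_preds.length).foldl (pvAStep1 ori_preds) st
     let tp := (List.range ori_preds.length).foldl
                 (pvAStep2 ori_tokens ori_preds be.1 be.2) ([], [])
     [tp.1, tp.2]) = pvBItem item := by
  obtain ⟨p, hp, hpne⟩ := hex
  obtain ⟨j, hj, rfl⟩ := List.mem_iff_getElem.mp hp
  have hjD : (item.getD 1 []).getD j "" ≠ "_" := by
    rwa [List.getD_eq_getElem?_getD, List.getElem?_eq_getElem hj]
  obtain ⟨e, hfe⟩ := pvFindEnd_some (item.getD 1 []) (item.getD 1 []).length ⟨j, hj, hjD⟩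
  obtain ⟨hen, -⟩ := pvFindEnd_lt (item.getD 1 []) (item.getD 1 []).length e hfe
  have hble := pvFindBegin_le (item.getD 1 []) e
  simp only []
  rw [pvLoop1_char (item.getD 1 []) (item.getD 1 []).length st, hfe]
  rw [pvLoop2_char (item.getD 0 []) (item.getD 1 []) (pvFindBegin (item.getD 1 []) e) e
        (item.getD 1 []).length hble hen hlen rfl]
  have hfe2 : pvFindEnd (item[1]?.getD []) (item[1]?.getD []).length = some e := by
    simpa using hfe
  simp [pvBItem, hfe2]

theorem pvFold_eq (items : List (List (List String))) (acc : List (List (List String)))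
    (st : Option Nat × Option Nat)
    (h : ∀ item ∈ items, 2 ≤ item.length ∧
      (item.getD 1 []).length ≤ (item.getD 0 []).length ∧
      ∃ p ∈ item.getD 1 [], p ≠ "_") :
    (items.foldl
      (fun (s : List (List (List String)) × Option Nat × Option Nat) item =>
        let ori_tokens := item.getD 0 []
        let ori_preds := item.getD 1 []
        let be := (List.range ori_preds.length).foldl (pvAStep1 ori_preds) s.2
        let tp := (List.range ori_preds.length).foldl
                    (pvAStep2 ori_tokens ori_preds be.1 be.2) ([], [])
        (s.1 ++ [[tp.1, tp.2]], be))
      (acc, st)).1 = acc ++ items.map pvBItem := by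
  induction items generalizing acc st with
  | nil => simp
  | cons item rest ih =>
    obtain ⟨-, hlen, hex⟩ := h item (by simp)
    have hitem := pvItem_eq item st hlen hex
    simp only [List.foldl_cons, List.map_cons]
    rw [ih _ _ (fun it hit => h it (by simp [hit]))]
    simp only at hitem
    rw [hitem]
    simp

-- ===== VERDICT (by name: the statement is the Claim_ definition above) =====
theorem data2tgt_data_spec : Claim_equal_data2tgt_data := by
  intro input_data _ hpre
  unfold Spec_data2tgt_data data2tgt_data data2tgt_data_alt
  simpa using pvFold_eq input_data [] (none, none) hpre
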